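-- pv_equiv track=rewrite | github.com/yassine-manai/Barrier_Controller_CarPark | crc.py | elkaCRC
-- ===== SOURCE A (Python) =====
-- def elkaCRC(data, crc):
--     crc_poly = 0x1021
--     for _ in range(8):
--         if (crc & 0x8000) == 0x8000:
--             if (data & 0x80) == 0x80:
--                 crc = (crc << 1) & 0xFFFF
--             else:
--                 crc = ((crc << 1) & 0xFFFF) ^ crc_poly
--         else:
--             if (data & 0x80) == 0x80:
--                 crc = ((crc << 1) & 0xFFFF) ^ crc_poly
--             else:
--                 crc = (crc << 1) & 0xFFFF
--         data = (data << 1) & 0xFF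
--     return crc
-- ===== SOURCE B (Python) =====
-- _CRC_POLY = 0x1021
--
--
-- def _crc_row(i):
--     r = (i << 8) & 0xFFFF
--     for _ in range(8):
--         if r & 0x8000:
--             r = ((r << 1) ^ _CRC_POLY) & 0xFFFF
--         else:
--             r = (r << 1) & 0xFFFF
--     return r
--
--
-- _CRC_TABLE = [_crc_row(i) for i in range(256)]
--
--
-- def elkaCRC(data, crc):
--     return ((crc << 8) & 0xFFFF) ^ _CRC_TABLE[((crc >> 8) ^ data) & 0xFF]
-- ===== Notes on version B (the rewrite author's own statement) =====
-- stated objective: alternative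
-- what changed: Replaces the per-call 8-iteration bit-by-bit loop over (data, crc) with the canonical table-driven CRC-16 form: a 256-entry table built once at import time, so elkaCRC itself is a single shift/xor/table-lookup expression with no loop.
import Mathlib
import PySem

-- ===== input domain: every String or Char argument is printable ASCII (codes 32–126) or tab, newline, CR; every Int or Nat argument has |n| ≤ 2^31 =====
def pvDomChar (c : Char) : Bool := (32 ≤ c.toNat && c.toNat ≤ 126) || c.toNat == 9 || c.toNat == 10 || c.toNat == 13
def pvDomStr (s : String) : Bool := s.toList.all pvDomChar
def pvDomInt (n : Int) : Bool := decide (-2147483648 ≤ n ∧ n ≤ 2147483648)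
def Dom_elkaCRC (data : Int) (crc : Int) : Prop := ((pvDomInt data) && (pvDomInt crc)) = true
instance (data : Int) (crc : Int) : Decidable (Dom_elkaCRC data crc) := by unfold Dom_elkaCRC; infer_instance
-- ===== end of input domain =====

-- B replaces A's per-call 8-iteration bit loop by a 256-entry table built once plus a single
-- shift/xor/lookup expression (same value on every input; equivalence proved below for all Int inputs).

-- ===== PORT A =====
-- one iteration of A's `for _ in range(8)` body, on the state (data, crc)
def pvStepA (s : Int × Int) : Int × Int :=
  let data := s.1
  let crc := s.2
  let crc :=
    if PySem.Int.band crc 0x8000 = 0x8000 then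
      (if PySem.Int.band data 0x80 = 0x80 then
        PySem.Int.band (crc <<< (1 : Nat)) 0xFFFF
      else
        PySem.Int.bxor (PySem.Int.band (crc <<< (1 : Nat)) 0xFFFF) 0x1021)
    else
      (if PySem.Int.band data 0x80 = 0x80 then
        PySem.Int.bxor (PySem.Int.band (crc <<< (1 : Nat)) 0xFFFF) 0x1021
      else
        PySem.Int.band (crc <<< (1 : Nat)) 0xFFFF)
  (PySem.Int.band (data <<< (1 : Nat)) 0xFF, crc)

def elkaCRC (data : Int) (crc : Int) : Int :=
  ((PySem.List.pyRange 0 8).foldl (fun s _ => pvStepA s) (data, crc)).2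

-- ===== PORT B =====
-- table row: runs the bit algorithm of Source B's _crc_row on byte i
def pvCrcRow (i : Int) : Int :=
  (PySem.List.pyRange 0 8).foldl
    (fun r _ =>
      if PySem.Int.band r 0x8000 ≠ 0 then
        PySem.Int.band (PySem.Int.bxor (r <<< (1 : Nat)) 0x1021) 0xFFFF
      else
        PySem.Int.band (r <<< (1 : Nat)) 0xFFFF)
    (PySem.Int.band (i <<< (8 : Nat)) 0xFFFF)

def pvCrcTable : List Int := (PySem.List.pyRange 0 256).map pvCrcRow

def elkaCRC_alt (data : Int) (crc : Int) : Int :=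
  PySem.Int.bxor (PySem.Int.band (crc <<< (8 : Nat)) 0xFFFF)
    (PySem.List.pyGetD pvCrcTable (PySem.Int.band (PySem.Int.bxor (crc >>> (8 : Nat)) data) 0xFF) 0)

-- ===== PRECONDITION & SPEC =====
def Spec_elkaCRC (data : Int) (crc : Int) (out : Int) : Prop := out = elkaCRC_alt data crc
instance (data : Int) (crc : Int) (out : Int) : Decidable (Spec_elkaCRC data crc out) := by unfold Spec_elkaCRC; infer_instance

-- ===== CLAIM (what is proved, stated in full; the proofs are below) =====
def Claim_equal_elkaCRC : Prop := ∀ (data : Int) (crc : Int), Dom_elkaCRC data crc → Spec_elkaCRC data crc (elkaCRC data crc)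

-- ===== LEMMAS AND PROOFS =====

-- abstract Nat model of one round of A's loop: data byte in .1, crc in .2
def pvRound (p : Nat × Nat) : Nat × Nat :=
  (2 * p.1 % 256,
   2 * p.2 % 65536 ^^^
     (if (decide (32768 ≤ p.2 % 65536) != decide (128 ≤ p.1 % 256)) then 4129 else 0))

def pvLoop : Nat → Nat × Nat → Nat × Nat
  | 0, p => p
  | n + 1, p => pvLoop n (pvRound p)

-- ---- generic arithmetic/bit lemmas ----
lemma pv_shl1 (a : Int) : a <<< (1 : Nat) = 2 * a := by
  rw [Int.shiftLeft_eq]; ring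

lemma pv_shl8 (a : Int) : a <<< (8 : Nat) = 256 * a := by
  rw [Int.shiftLeft_eq]; norm_num; ring

lemma pv_shr8 (a : Int) : a >>> (8 : Nat) = a / 256 := by
  rw [Int.shiftRight_eq_div_pow]; norm_num

lemma pv_and_pow (n : Nat) (i : Nat) : n &&& 2^i = (n / 2^i % 2) * 2^i := by
  rw [Nat.and_two_pow n i, Nat.testBit_eq_decide_div_mod_eq]
  by_cases hb : n / 2^i % 2 = 1 <;> simp [hb]; omega

lemma pv_band_ffff (a : Int) : PySem.Int.band a 65535 = a % 65536 := by
  unfold PySem.Int.band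
  split_ifs with h1 h2 h2
  · have h := Nat.and_two_pow_sub_one_eq_mod a.toNat 16
    simp only [show (2:Nat)^16 = 65536 from rfl] at h
    rw [show (65535:Int).toNat = 65535 from rfl, h]; omega
  · exact absurd (by norm_num) h2
  · have h := Nat.and_two_pow_sub_one_eq_mod (-a - 1).toNat 16
    simp only [show (2:Nat)^16 = 65536 from rfl] at h
    rw [show (65535:Int).toNat = 65535 from rfl, Nat.and_comm 65535, h]; omega
  · exact absurd (by norm_num) h2

lemma pv_band_ff (a : Int) : PySem.Int.band a 255 = a % 256 := by
  unfold PySem.Int.band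
  split_ifs with h1 h2 h2
  · have h := Nat.and_two_pow_sub_one_eq_mod a.toNat 8
    simp only [show (2:Nat)^8 = 256 from rfl] at h
    rw [show (255:Int).toNat = 255 from rfl, h]; omega
  · exact absurd (by norm_num) h2
  · have h := Nat.and_two_pow_sub_one_eq_mod (-a - 1).toNat 8
    simp only [show (2:Nat)^8 = 256 from rfl] at h
    rw [show (255:Int).toNat = 255 from rfl, Nat.and_comm 255, h]; omega
  · exact absurd (by norm_num) h2

lemma pv_band_8000 (a : Int) : PySem.Int.band a 32768 = 32768 ↔ 32768 ≤ a % 65536 := by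
  unfold PySem.Int.band
  split_ifs with h1 h2 h2
  · have h := pv_and_pow a.toNat 15
    simp only [show (2:Nat)^15 = 32768 from rfl] at h
    rw [show (32768:Int).toNat = 32768 from rfl, h]; omega
  · exact absurd (by norm_num) h2
  · have h := pv_and_pow (-a - 1).toNat 15
    simp only [show (2:Nat)^15 = 32768 from rfl] at h
    rw [show (32768:Int).toNat = 32768 from rfl, Nat.and_comm 32768, h]; omega
  · exact absurd (by norm_num) h2

lemma pv_band_80 (a : Int) : PySem.Int.band a 128 = 128 ↔ 128 ≤ a % 256 := by
  unfold PySem.Int.band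
  split_ifs with h1 h2 h2
  · have h := pv_and_pow a.toNat 7
    simp only [show (2:Nat)^7 = 128 from rfl] at h
    rw [show (128:Int).toNat = 128 from rfl, h]; omega
  · exact absurd (by norm_num) h2
  · have h := pv_and_pow (-a - 1).toNat 7
    simp only [show (2:Nat)^7 = 128 from rfl] at h
    rw [show (128:Int).toNat = 128 from rfl, Nat.and_comm 128, h]; omega
  · exact absurd (by norm_num) h2

lemma pv_xor_mod (m n : Nat) : (m ^^^ n) % 256 = m % 256 ^^^ n % 256 := by
  apply Nat.eq_of_testBit_eq
  intro j
  simp only [show (256:Nat) = 2^8 from rfl, Nat.testBit_mod_two_pow, Nat.testBit_xor]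
  by_cases hj : j < 8 <;> simp [hj]

set_option maxRecDepth 4096 in
lemma pv_compl (z : Nat) (h : z < 256) : 255 ^^^ z = 255 - z := by
  have : ∀ x : Fin 256, 255 ^^^ x.val = 255 - x.val := by decide
  exact this ⟨z, h⟩

lemma pv_bxor_emod (x y : Int) :
    (PySem.Int.bxor x y) % 256 = (((x % 256).toNat ^^^ (y % 256).toNat : Nat) : Int) := by
  unfold PySem.Int.bxor
  split_ifs with h1 h2 h2
  · rw [show (x % 256).toNat = x.toNat % 256 from by omega,
      show (y % 256).toNat = y.toNat % 256 from by omega, ← pv_xor_mod]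
    generalize x.toNat ^^^ y.toNat = m
    omega
  · rw [show (x % 256).toNat = x.toNat % 256 from by omega,
      show (y % 256).toNat = 255 - (-y - 1).toNat % 256 from by omega,
      ← pv_compl ((-y - 1).toNat % 256) (by omega),
      show (-((x.toNat ^^^ (-y - 1).toNat : Nat) : Int) - 1) % 256
        = ((255 - (x.toNat ^^^ (-y - 1).toNat) % 256 : Nat) : Int) from by
          generalize x.toNat ^^^ (-y - 1).toNat = m; omega,
      ← pv_compl ((x.toNat ^^^ (-y - 1).toNat) % 256) (by omega), pv_xor_mod]
    congr 1
    simp [Nat.xor_left_comm]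
  · rw [show (y % 256).toNat = y.toNat % 256 from by omega,
      show (x % 256).toNat = 255 - (-x - 1).toNat % 256 from by omega,
      ← pv_compl ((-x - 1).toNat % 256) (by omega),
      show (-(((-x - 1).toNat ^^^ y.toNat : Nat) : Int) - 1) % 256
        = ((255 - ((-x - 1).toNat ^^^ y.toNat) % 256 : Nat) : Int) from by
          generalize (-x - 1).toNat ^^^ y.toNat = m; omega,
      ← pv_compl (((-x - 1).toNat ^^^ y.toNat) % 256) (by omega), pv_xor_mod]
    congr 1
    simp [Nat.xor_comm, Nat.xor_left_comm]
  · rw [show (x % 256).toNat = 255 - (-x - 1).toNat % 256 from by omega,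
      show (y % 256).toNat = 255 - (-y - 1).toNat % 256 from by omega,
      ← pv_compl ((-x - 1).toNat % 256) (by omega),
      ← pv_compl ((-y - 1).toNat % 256) (by omega),
      show ((((-x - 1).toNat ^^^ (-y - 1).toNat : Nat) : Int)) % 256
        = ((((-x - 1).toNat ^^^ (-y - 1).toNat) % 256 : Nat) : Int) from by
          generalize (-x - 1).toNat ^^^ (-y - 1).toNat = m; omega,
      pv_xor_mod]
    congr 1
    simp [Nat.xor_comm, Nat.xor_left_comm]

-- ---- bridging A's Int round to the Nat model ----
lemma pvStepA_eq (di ci : Int) :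
    pvStepA (di, ci) =
      (((pvRound ((di % 256).toNat, (ci % 65536).toNat)).1 : Int),
       ((pvRound ((di % 256).toNat, (ci % 65536).toNat)).2 : Int)) := by
  have hxor : ∀ a : Int, 0 ≤ a → PySem.Int.bxor a 4129 = ((a.toNat ^^^ 4129 : Nat) : Int) := by
    intro a ha
    rw [PySem.Int.bxor_of_nonneg ha (by norm_num)]
    simp only [show (4129 : Int).toNat = 4129 from rfl]
  have c1 : PySem.Int.band ci 32768 = 32768 ↔ 32768 ≤ (ci % 65536).toNat := by
    rw [pv_band_8000]; omega
  have c2 : PySem.Int.band di 128 = 128 ↔ 128 ≤ (di % 256).toNat := by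
    rw [pv_band_80]; omega
  have m1 : (ci % 65536).toNat % 65536 = (ci % 65536).toNat := by omega
  have m2 : (di % 256).toNat % 256 = (di % 256).toNat := by omega
  simp only [pvStepA, pvRound, m1, m2]
  by_cases H1 : 32768 ≤ (ci % 65536).toNat <;> by_cases H2 : 128 ≤ (di % 256).toNat <;>
    simp [c1, c2, H1, H2, pv_shl1, pv_band_ffff, pv_band_ff, Prod.mk.injEq] <;>
    refine ⟨by omega, ?_⟩
  · omega
  · rw [hxor (2 * ci % 65536) (by omega),
      show (2 * ci % 65536).toNat = 2 * (ci % 65536).toNat % 65536 from by omega]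
  · rw [hxor (2 * ci % 65536) (by omega),
      show (2 * ci % 65536).toNat = 2 * (ci % 65536).toNat % 65536 from by omega]
  · omega

lemma pvRound_lt (p : Nat × Nat) : (pvRound p).1 < 256 ∧ (pvRound p).2 < 65536 := by
  unfold pvRound
  refine ⟨by omega, ?_⟩
  have h : (2 * p.2 % 65536) < 2^16 := by omega
  have h2 : (if (decide (32768 ≤ p.2 % 65536) != decide (128 ≤ p.1 % 256)) then 4129 else 0) < 2^16 := by
    split <;> omega
  exact Nat.xor_lt_two_pow h h2

lemma pvStepA_cast (p : Nat × Nat) (h1 : p.1 < 256) (h2 : p.2 < 65536) :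
    pvStepA ((p.1 : Int), (p.2 : Int)) = (((pvRound p).1 : Int), ((pvRound p).2 : Int)) := by
  rw [pvStepA_eq,
    show (((p.1 : Int) % 256).toNat, ((p.2 : Int) % 65536).toNat) = p from by
      simp only [Prod.ext_iff]; constructor <;> omega]

-- ---- GF(2)-linearity of the Nat model ----
lemma pv_bit15 (n : Nat) : decide (32768 ≤ n % 65536) = n.testBit 15 := by
  rw [Nat.testBit_eq_decide_div_mod_eq, decide_eq_decide]; omega

lemma pv_bit7 (n : Nat) : decide (128 ≤ n % 256) = n.testBit 7 := by
  rw [Nat.testBit_eq_decide_div_mod_eq, decide_eq_decide]; omega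

lemma pv_mul_mod_xor (a b k : Nat) (M : Nat) (hM : M = 2^k) :
    2 * (a ^^^ b) % M = (2 * a % M) ^^^ (2 * b % M) := by
  subst hM
  apply Nat.eq_of_testBit_eq
  intro j
  simp only [show ∀ x : Nat, 2 * x = x <<< 1 from fun x => by simp [Nat.shiftLeft_eq]; ring,
    Nat.testBit_mod_two_pow, Nat.testBit_shiftLeft, Nat.testBit_xor]
  by_cases h1 : 1 ≤ j <;> by_cases h2 : j < k <;> simp [h1, h2]

lemma pvRound_lin (p q : Nat × Nat) :
    pvRound (p.1 ^^^ q.1, p.2 ^^^ q.2) =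
      ((pvRound p).1 ^^^ (pvRound q).1, (pvRound p).2 ^^^ (pvRound q).2) := by
  unfold pvRound
  simp only [Prod.mk.injEq]
  constructor
  · exact pv_mul_mod_xor p.1 q.1 8 256 rfl
  · rw [pv_mul_mod_xor p.2 q.2 16 65536 rfl]
    simp only [pv_bit15, pv_bit7, Nat.testBit_xor]
    cases hpc : p.2.testBit 15 <;> cases hqc : q.2.testBit 15 <;>
      cases hpd : p.1.testBit 7 <;> cases hqd : q.1.testBit 7 <;>
      simp [Nat.xor_comm, Nat.xor_left_comm]

lemma pvLoop_lin (n : Nat) (p q : Nat × Nat) :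
    pvLoop n (p.1 ^^^ q.1, p.2 ^^^ q.2) =
      ((pvLoop n p).1 ^^^ (pvLoop n q).1, (pvLoop n p).2 ^^^ (pvLoop n q).2) := by
  induction n generalizing p q with
  | zero => rfl
  | succ m ih =>
    show pvLoop m (pvRound _) = _
    rw [pvRound_lin p q, ih (pvRound p) (pvRound q)]
    rfl

-- ---- finite facts (checked by the kernel over all 256 bytes) ----
set_option maxRecDepth 8192 in
lemma pvF1 : ∀ x : Fin 256, pvLoop 8 (0, x.val) = (0, x.val * 256) := by decide

set_option maxRecDepth 8192 in
lemma pvF2 : ∀ x : Fin 256, pvLoop 8 (0, x.val * 256) = pvLoop 8 (x.val, 0) := by decide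

set_option maxRecDepth 8192 in
lemma pvRowFin : ∀ x : Fin 256, pvCrcRow (x.val : Int) = ((pvLoop 8 (x.val, 0)).2 : Int) := by decide

lemma pv_split (c : Nat) : c / 256 * 256 ^^^ c % 256 = c := by
  apply Nat.eq_of_testBit_eq
  intro j
  have h1 : c / 256 * 256 = (c >>> 8) <<< 8 := by
    simp [Nat.shiftLeft_eq, Nat.shiftRight_eq_div_pow]
  rw [h1, Nat.testBit_xor, Nat.testBit_shiftLeft, Nat.testBit_shiftRight,
    show (256:Nat) = 2^8 from rfl, Nat.testBit_mod_two_pow]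
  by_cases hj : 8 ≤ j
  · simp [hj, show ¬ (j < 8) from by omega, show 8 + (j - 8) = j from by omega]
  · simp [hj, show j < 8 from by omega]

-- ---- main Nat-level theorem: 8 bit rounds = table form ----
lemma pvCrcNat (d c : Nat) (hc : c < 65536) :
    (pvLoop 8 (d, c)).2 = c % 256 * 256 ^^^ (pvLoop 8 (d ^^^ c / 256, 0)).2 := by
  have hch : c / 256 < 256 := by omega
  have hcl : c % 256 < 256 := by omega
  have E1 := pvLoop_lin 8 (d, c / 256 * 256) (0, c % 256)
  have E2 := pvLoop_lin 8 (d, 0) (0, c / 256 * 256)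
  have E3 := pvLoop_lin 8 (d, 0) (c / 256, 0)
  have F1 := pvF1 ⟨c % 256, hcl⟩
  have F2 := pvF2 ⟨c / 256, hch⟩
  simp only [pv_split, Nat.xor_zero, Nat.zero_xor] at E1 E2 E3 F1 F2
  rw [E1, E2, F2, ← E3, F1]
  simp [Nat.xor_comm]

-- ---- the two ports, reduced to the Nat model ----
lemma pvChain (l : List Int) (p : Nat × Nat) (h1 : p.1 < 256) (h2 : p.2 < 65536) :
    List.foldl (fun s _ => pvStepA s) ((p.1 : Int), (p.2 : Int)) l
      = (((pvLoop l.length p).1 : Int), ((pvLoop l.length p).2 : Int)) := by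
  induction l generalizing p with
  | nil => rfl
  | cons x xs ih =>
    simp only [List.foldl_cons, List.length_cons]
    rw [pvStepA_cast p h1 h2, ih (pvRound p) (pvRound_lt p).1 (pvRound_lt p).2]
    rfl

lemma elkaCRC_eq (data crc : Int) :
    elkaCRC data crc = ((pvLoop 8 ((data % 256).toNat, (crc % 65536).toNat)).2 : Int) := by
  unfold elkaCRC
  rw [show PySem.List.pyRange 0 8 = [0, 1, 2, 3, 4, 5, 6, 7] from rfl, List.foldl_cons]
  show (List.foldl _ (pvStepA (data, crc)) _).2 = _
  rw [pvStepA_eq data crc,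
    pvChain [1, 2, 3, 4, 5, 6, 7] _ (pvRound_lt _).1 (pvRound_lt _).2]
  rfl

lemma elkaCRC_alt_eq (data crc : Int) :
    elkaCRC_alt data crc =
      (((crc % 65536).toNat % 256 * 256 ^^^
        (pvLoop 8 ((crc % 65536).toNat / 256 ^^^ (data % 256).toNat, 0)).2 : Nat) : Int) := by
  have hk8 : (crc % 65536).toNat / 256 ^^^ (data % 256).toNat < 2 ^ 8 :=
    Nat.xor_lt_two_pow (by omega) (by omega)
  have hk : (crc % 65536).toNat / 256 ^^^ (data % 256).toNat < 256 := by omega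
  have G := PySem.List.pyGetD_map_pyRange pvCrcRow 256
    ((crc % 65536).toNat / 256 ^^^ (data % 256).toNat) 0 hk
  simp only [Nat.cast_ofNat] at G
  unfold elkaCRC_alt pvCrcTable
  rw [pv_shr8, pv_band_ff, pv_bxor_emod,
    show ((crc / 256) % 256).toNat = (crc % 65536).toNat / 256 from by omega,
    G, pvRowFin ⟨_, hk⟩,
    pv_shl8, pv_band_ffff,
    show 256 * crc % 65536 = (((crc % 65536).toNat % 256 * 256 : Nat) : Int) from by omega,
    PySem.Int.bxor_natCast]

-- ===== VERDICT (by name: the statement is the Claim_ definition above) =====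
theorem elkaCRC_spec : Claim_equal_elkaCRC := by
  intro data crc _
  unfold Spec_elkaCRC
  rw [elkaCRC_eq, elkaCRC_alt_eq,
    pvCrcNat ((data % 256).toNat) ((crc % 65536).toNat) (by omega),
    Nat.xor_comm ((data % 256).toNat)]
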